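-- pv_equiv track=rewrite | github.com/asamallab/TMRvsBioLogic | Stability_analysis_of_RBN_ensembles/derrida_final_hamming_fragility/src/Derrida_fragility_hamming_distance_computation.py | batch
-- ===== SOURCE A (Python) =====
-- def batch(total_networks, total_cores):
--     networks_per_core = total_networks // total_cores
--     remaining_networks = total_networks % total_cores
--     allocations = [networks_per_core] * total_cores
--     allocations[:remaining_networks] = [x + 1 for x in allocations[:remaining_networks]]
--     network_init_list = [sum(allocations[:i]) for i in range(len(allocations))]
--     network_final_list = [sum(allocations[:i]) for i in range(1, len(allocations) + 1)]
--     return network_init_list, network_final_list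
-- ===== SOURCE B (Python) =====
-- def batch(total_networks, total_cores):
--     # One pass: keep a running cumulative sum instead of re-summing a prefix per core.
--     quotient, remainder = divmod(total_networks, total_cores)
--     starts, ends = [], []
--     run = 0
--     for i in range(total_cores):
--         nxt = run + quotient + (1 if i < remainder else 0)
--         starts.append(run)
--         ends.append(nxt)
--         run = nxt
--     return starts, ends
-- ===== Notes on version B (the rewrite author's own statement) =====
-- stated objective: faster
-- what changed: Replaces the per-core re-summation of list prefixes (sum(allocations[:i]) for every i) by a single pass that maintains one running cumulative sum, emitting each start/end boundary as it goes.
import Mathlib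
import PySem

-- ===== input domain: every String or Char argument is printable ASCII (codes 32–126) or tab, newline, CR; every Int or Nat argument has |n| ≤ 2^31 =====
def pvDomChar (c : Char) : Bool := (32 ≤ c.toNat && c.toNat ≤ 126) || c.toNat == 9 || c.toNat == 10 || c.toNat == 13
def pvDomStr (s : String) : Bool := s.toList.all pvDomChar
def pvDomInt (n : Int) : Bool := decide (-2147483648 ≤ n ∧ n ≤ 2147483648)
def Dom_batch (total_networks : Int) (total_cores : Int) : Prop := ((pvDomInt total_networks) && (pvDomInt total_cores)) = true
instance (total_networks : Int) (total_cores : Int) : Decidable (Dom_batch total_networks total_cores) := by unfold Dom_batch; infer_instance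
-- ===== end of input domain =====

-- B replaces A's quadratic per-core prefix re-summation by one running cumulative sum (objective: faster).

-- ===== PORT A =====
def batch (total_networks : Int) (total_cores : Int) : List Int × List Int :=
  let networks_per_core := PySem.Int.floordiv total_networks total_cores
  let remaining_networks := PySem.Int.mod total_networks total_cores
  let allocations0 : List Int := List.replicate total_cores.toNat networks_per_core
  -- slice assignment allocations[:r] = [x+1 for x in allocations[:r]]: the replacement has the
  -- same length as the slice, so the list becomes (mapped prefix) ++ (rest) — exact here
  let allocations :=
    (PySem.List.slice allocations0 none (some remaining_networks)).map (· + 1) ++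
      PySem.List.slice allocations0 (some remaining_networks) none
  let network_init_list :=
    (PySem.List.pyRange 0 (allocations.length : Int) 1).map
      (fun i => (PySem.List.slice allocations none (some i)).sum)
  let network_final_list :=
    (PySem.List.pyRange 1 ((allocations.length : Int) + 1) 1).map
      (fun i => (PySem.List.slice allocations none (some i)).sum)
  (network_init_list, network_final_list)

-- ===== PORT B =====
def batch_alt (total_networks : Int) (total_cores : Int) : List Int × List Int :=
  let quotient := PySem.Int.floordiv total_networks total_cores
  let remainder := PySem.Int.mod total_networks total_cores
  let res := (PySem.List.pyRange 0 total_cores 1).foldl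
    (fun (st : List Int × List Int × Int) i =>
      let nxt := st.2.2 + quotient + (if i < remainder then 1 else 0)
      (st.1 ++ [st.2.2], st.2.1 ++ [nxt], nxt))
    ([], [], 0)
  (res.1, res.2.1)

-- ===== PRECONDITION & SPEC =====
-- Pre_ excludes exactly total_cores = 0, where both Pythons raise ZeroDivisionError.
def Pre_batch (total_networks : Int) (total_cores : Int) : Prop := total_cores ≠ 0
instance (total_networks : Int) (total_cores : Int) : Decidable (Pre_batch total_networks total_cores) := by unfold Pre_batch; infer_instance
def pvWitness_batch : Int × Int := (10, 3)
def Spec_batch (total_networks : Int) (total_cores : Int) (out : List Int × List Int) : Prop := out = batch_alt total_networks total_cores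
instance (total_networks : Int) (total_cores : Int) (out : List Int × List Int) : Decidable (Spec_batch total_networks total_cores out) := by unfold Spec_batch; infer_instance

-- ===== CLAIM (what is proved, stated in full; the proofs are below) =====
def Claim_equal_batch : Prop := ∀ (total_networks : Int) (total_cores : Int), Dom_batch total_networks total_cores → Pre_batch total_networks total_cores → Spec_batch total_networks total_cores (batch total_networks total_cores)

-- ===== LEMMAS AND PROOFS =====

-- closed form of the running sum after i iterations
def pvG (q r : Int) (k : Nat) : Int := k * q + min (k : Int) r

theorem pvG_step (q r : Int) (m : Nat) :
    pvG q r (m + 1) = pvG q r m + q + (if (m : Int) < r then 1 else 0) := by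
  simp only [pvG]
  push_cast
  rw [add_one_mul]
  split_ifs with h <;> omega

theorem pvB_fold (q r : Int) (hr : 0 ≤ r) (n : Nat) :
    (PySem.List.pyRange 0 (n : Int) 1).foldl
        (fun (st : List Int × List Int × Int) i =>
          (st.1 ++ [st.2.2], st.2.1 ++ [st.2.2 + q + (if i < r then 1 else 0)],
            st.2.2 + q + (if i < r then 1 else 0)))
        ([], [], 0) =
      ((List.range n).map (pvG q r), (List.range n).map (fun k => pvG q r (k + 1)), pvG q r n) := by
  induction n with
  | zero =>
    rw [PySem.List.pyRange_one]
    simp only [Nat.cast_zero, sub_zero, Int.toNat_zero, List.range_zero, List.map_nil,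
      List.foldl_nil, pvG]
    simp [min_eq_left hr]
  | succ m ih =>
    have hcast : ((m + 1 : Nat) : Int) = (m : Int) + 1 := by push_cast; ring
    rw [hcast, PySem.List.pyRange_one_succ_right (by positivity), List.foldl_append, ih]
    simp [List.range_succ, pvG_step q r m]

-- prefix sums of the per-core allocation list, closed form
theorem pvSum_take (q : Int) (a b i : Nat) (hi : i ≤ a + b) :
    ((List.replicate a (q + 1) ++ List.replicate b q).take i).sum =
      (i : Int) * q + min (i : Int) (a : Int) := by
  rw [List.take_append, List.sum_append, List.take_replicate, List.take_replicate,
    List.sum_replicate, List.sum_replicate]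
  simp only [List.length_replicate, nsmul_eq_mul]
  have h2 : min (i - a) b = i - min i a := by omega
  have hsle : min i a ≤ i := Nat.min_le_left _ _
  rw [h2, ← Nat.cast_min, Nat.cast_sub hsle]
  push_cast
  ring

-- ===== VERDICT (by name: the statement is the Claim_ definition above) =====
theorem batch_spec : Claim_equal_batch := by
  intro tn tc _ hpre
  have hne : tc ≠ 0 := hpre
  show batch tn tc = batch_alt tn tc
  by_cases htc : 0 < tc
  · -- positive core count
    set q := PySem.Int.floordiv tn tc with hq
    set r := PySem.Int.mod tn tc with hrdef
    have hr0 : 0 ≤ r := PySem.Int.mod_nonneg tn htc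
    have hrlt : r < tc := PySem.Int.mod_lt tn htc
    have hn : (tc.toNat : Int) = tc := Int.toNat_of_nonneg (le_of_lt htc)
    set n := tc.toNat with hndef
    set a := r.toNat with hadef
    have ha : (a : Int) = r := Int.toNat_of_nonneg hr0
    have haltn : a ≤ n := by omega
    -- A's allocation list
    have halloc :
        (PySem.List.slice (List.replicate n q) none (some r)).map (· + 1) ++
            PySem.List.slice (List.replicate n q) (some r) none =
          List.replicate a (q + 1) ++ List.replicate (n - a) q := by
      rw [PySem.List.slice_to (List.replicate n q) hr0,
        PySem.List.slice_from (List.replicate n q) hr0,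
        List.take_replicate, List.drop_replicate]
      congr 1
      rw [Nat.min_eq_left haltn]
      simp [List.map_replicate]
    set L : List Int := List.replicate a (q + 1) ++ List.replicate (n - a) q with hL
    have hlen : L.length = n := by simp [hL]; omega
    have hsum : ∀ i : Nat, i ≤ n →
        (PySem.List.slice L none (some (i : Int))).sum = pvG q r i := by
      intro i hi
      rw [PySem.List.slice_to L (by positivity : (0:Int) ≤ (i:Int)), Int.toNat_natCast, hL]
      rw [pvSum_take q a (n - a) i (by omega)]
      simp [pvG, ha]
    -- unfold both sides
    show
      (let allocations :=
        (PySem.List.slice (List.replicate n q) none (some r)).map (· + 1) ++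
          PySem.List.slice (List.replicate n q) (some r) none
       ((PySem.List.pyRange 0 (allocations.length : Int) 1).map
          (fun i => (PySem.List.slice allocations none (some i)).sum),
        (PySem.List.pyRange 1 ((allocations.length : Int) + 1) 1).map
          (fun i => (PySem.List.slice allocations none (some i)).sum))) = batch_alt tn tc
    rw [halloc]
    have hB : batch_alt tn tc =
        ((List.range n).map (pvG q r), (List.range n).map (fun k => pvG q r (k + 1))) := by
      show
        (let res := (PySem.List.pyRange 0 tc 1).foldl
            (fun (st : List Int × List Int × Int) i =>
              (st.1 ++ [st.2.2], st.2.1 ++ [st.2.2 + q + (if i < r then 1 else 0)],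
                st.2.2 + q + (if i < r then 1 else 0)))
            ([], [], 0)
         (res.1, res.2.1)) =
          ((List.range n).map (pvG q r), (List.range n).map (fun k => pvG q r (k + 1)))
      rw [← hn, pvB_fold q r hr0 n]
    rw [hB]
    simp only [hlen, hn]
    refine Prod.ext ?_ ?_
    · rw [PySem.List.pyRange_one 0 tc]
      have h0 : (tc - 0).toNat = n := by omega
      rw [h0, List.map_map]
      apply List.map_congr_left
      intro k hk
      rw [List.mem_range] at hk
      show (PySem.List.slice L none (some (0 + (k : Int)))).sum = pvG q r k
      rw [zero_add]
      exact hsum k (le_of_lt hk)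
    · rw [PySem.List.pyRange_one 1 (tc + 1)]
      have h1 : (tc + 1 - 1).toNat = n := by omega
      rw [h1, List.map_map]
      apply List.map_congr_left
      intro k hk
      rw [List.mem_range] at hk
      show (PySem.List.slice L none (some (1 + (k : Int)))).sum = pvG q r (k + 1)
      have : (1 : Int) + (k : Int) = ((k + 1 : Nat) : Int) := by push_cast; ring
      rw [this]
      exact hsum (k + 1) hk
  · -- negative core count: both sides are ([], [])
    have htc' : tc < 0 := by
      rcases lt_or_gt_of_ne hne with h | h
      · exact h
      · exact absurd h htc
    have h0 : tc.toNat = 0 := by omega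
    have hA : batch tn tc = ([], []) := by
      show
        (let allocations :=
          (PySem.List.slice (List.replicate tc.toNat (PySem.Int.floordiv tn tc)) none
              (some (PySem.Int.mod tn tc))).map (· + 1) ++
            PySem.List.slice (List.replicate tc.toNat (PySem.Int.floordiv tn tc))
              (some (PySem.Int.mod tn tc)) none
         ((PySem.List.pyRange 0 (allocations.length : Int) 1).map
            (fun i => (PySem.List.slice allocations none (some i)).sum),
          (PySem.List.pyRange 1 ((allocations.length : Int) + 1) 1).map
            (fun i => (PySem.List.slice allocations none (some i)).sum))) = ([], [])
      rw [h0]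
      simp [PySem.List.slice]
    have hB : batch_alt tn tc = ([], []) := by
      show
        (let res := (PySem.List.pyRange 0 tc 1).foldl
            (fun (st : List Int × List Int × Int) i =>
              (st.1 ++ [st.2.2],
                st.2.1 ++ [st.2.2 + PySem.Int.floordiv tn tc +
                  (if i < PySem.Int.mod tn tc then 1 else 0)],
                st.2.2 + PySem.Int.floordiv tn tc +
                  (if i < PySem.Int.mod tn tc then 1 else 0)))
            ([], [], 0)
         (res.1, res.2.1)) = ([], [])
      rw [PySem.List.pyRange_one 0 tc]
      have : (tc - 0).toNat = 0 := by omega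
      rw [this]
      simp
    rw [hA, hB]
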